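-- pv_equiv track=rewrite | github.com/MatiasSagastume/TDA-TP3 | greedy1.py | greedy1
-- ===== SOURCE A (Python) =====
-- def greedy1(maestros, k):
--     maestros = sorted(maestros, key=lambda x: -x[1])
--     conjuntos = []
--     for i in range(k):
--         conjuntos.append(set())
--     for elemento in maestros:
--         minimo = encontrar_minimo(conjuntos)
--         minimo.add(elemento)
--     return conjuntos
--
-- def encontrar_minimo(conjuntos):
--     minimo = conjuntos[0]
--     for conj in conjuntos:
--         if sumatoria(conj) < sumatoria(minimo):
--             minimo = conj
--     return minimo
--
-- def sumatoria(conj):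
--     res = 0
--     for elemento in conj:
--         res += elemento[1]
--     return res
-- ===== SOURCE B (Python) =====
-- def greedy1(maestros, k):
--     buckets = [set() for _ in range(k)]
--     sums = [0] * k
--     for elemento in sorted(maestros, key=lambda x: -x[1]):
--         i = sums.index(min(sums))
--         if elemento not in buckets[i]:
--             buckets[i].add(elemento)
--             sums[i] += elemento[1]
--     return buckets
-- ===== Notes on version B (the rewrite author's own statement) =====
-- stated objective: faster
-- what changed: B maintains one running sum per subset, updated incrementally when an element is inserted, and picks the target subset as sums.index(min(sums)); A's inner pass that re-sums every set for every element disappears.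
import Mathlib
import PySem

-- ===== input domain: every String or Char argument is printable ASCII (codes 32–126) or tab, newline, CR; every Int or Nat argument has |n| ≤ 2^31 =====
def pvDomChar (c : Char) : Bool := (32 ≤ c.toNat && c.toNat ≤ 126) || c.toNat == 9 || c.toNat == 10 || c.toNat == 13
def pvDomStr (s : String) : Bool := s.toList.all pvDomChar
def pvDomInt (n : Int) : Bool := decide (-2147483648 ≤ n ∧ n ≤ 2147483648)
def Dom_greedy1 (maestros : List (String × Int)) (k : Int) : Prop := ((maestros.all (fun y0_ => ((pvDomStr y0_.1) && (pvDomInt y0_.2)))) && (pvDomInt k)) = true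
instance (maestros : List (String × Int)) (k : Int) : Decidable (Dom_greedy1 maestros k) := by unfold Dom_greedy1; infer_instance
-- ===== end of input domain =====

-- B replaces A's per-element re-summation of every set by incrementally maintained
-- running sums and an index-of-minimum lookup (objective: faster).

-- ===== PORT A =====
-- sum of the second components of a set's elements; iterating the Set's list is
-- exact here because addition is order-independent
def sumatoria (conj : PySem.Set (String × Int)) : Int :=
  conj.foldl (fun res elemento => res + elemento.2) 0

-- Python keeps the minimal SET OBJECT and later mutates it in place; the port
-- tracks that object's position in the list (state = (index of current minimo,
-- index of current conj)); on an empty list Python raises IndexError (excluded by Pre_)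
def encontrarMinimo (conjuntos : List (PySem.Set (String × Int))) : Nat :=
  (conjuntos.foldl
    (fun (st : Nat × Nat) conj =>
      (if sumatoria conj < sumatoria (conjuntos.getD st.1 PySem.Set.empty) then st.2 else st.1,
       st.2 + 1))
    (0, 0)).1

def greedy1 (maestros : List (String × Int)) (k : Int) : List (List (String × Int)) :=
  let maestros' := PySem.List.sorted maestros (fun x => -x.2) false
  let conjuntos : List (PySem.Set (String × Int)) :=
    (PySem.List.pyRange 0 k 1).foldl (fun acc _ => acc ++ [PySem.Set.empty]) []
  maestros'.foldl
    (fun conjs elemento =>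
      let i := encontrarMinimo conjs
      conjs.set i (PySem.Set.add (conjs.getD i PySem.Set.empty) elemento))
    conjuntos

-- ===== PORT B =====
-- i = sums.index(min(sums)); on empty sums Python raises ValueError (excluded by Pre_)
def bucketIdx (sums : List Int) : Nat :=
  ((PySem.List.min? sums (fun x => x)).bind (fun m => PySem.List.index? sums m)).getD 0

def greedy1_alt (maestros : List (String × Int)) (k : Int) : List (List (String × Int)) :=
  let init : List (PySem.Set (String × Int)) × List Int :=
    ((PySem.List.pyRange 0 k 1).map (fun _ => PySem.Set.empty), List.replicate k.toNat 0)
  let fin := (PySem.List.sorted maestros (fun x => -x.2) false).foldl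
    (fun st elemento =>
      let i := bucketIdx st.2
      if elemento ∈ st.1.getD i PySem.Set.empty then st
      else (st.1.set i (PySem.Set.add (st.1.getD i PySem.Set.empty) elemento),
            st.2.set i (st.2.getD i 0 + elemento.2)))
    init
  fin.1

-- ===== PRECONDITION & SPEC =====
-- With k ≤ 0 and a nonempty maestros, A raises IndexError (conjuntos[0] on an
-- empty list) and B raises ValueError (min of an empty list): excluded.
def Pre_greedy1 (maestros : List (String × Int)) (k : Int) : Prop :=
  1 ≤ k ∨ maestros = []
instance (maestros : List (String × Int)) (k : Int) : Decidable (Pre_greedy1 maestros k) := by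
  unfold Pre_greedy1; infer_instance

def pvWitness_greedy1 : (List (String × Int)) × Int := ([("ana", 3), ("bob", 1)], 2)

def Spec_greedy1 (maestros : List (String × Int)) (k : Int) (out : List (List (String × Int))) : Prop := out = greedy1_alt maestros k
instance (maestros : List (String × Int)) (k : Int) (out : List (List (String × Int))) : Decidable (Spec_greedy1 maestros k out) := by unfold Spec_greedy1; infer_instance

-- ===== CLAIM (what is proved, stated in full; the proofs are below) =====
def Claim_equal_greedy1 : Prop := ∀ (maestros : List (String × Int)) (k : Int), Dom_greedy1 maestros k → Pre_greedy1 maestros k → Spec_greedy1 maestros k (greedy1 maestros k)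

-- ===== LEMMAS AND PROOFS =====

-- r is the first position of a minimal entry of s
def goodIdx (s : List Int) (r : Nat) : Prop :=
  r < s.length ∧ (∀ j, j < s.length → s.getD r 0 ≤ s.getD j 0) ∧ (∀ j, j < r → s.getD r 0 < s.getD j 0)

lemma goodIdx_unique {s : List Int} {r1 r2 : Nat} (h1 : goodIdx s r1) (h2 : goodIdx s r2) :
    r1 = r2 := by
  by_contra hne
  rcases Nat.lt_or_ge r1 r2 with h | h
  · have ha := h2.2.2 r1 h
    have hb := h1.2.1 r2 h2.1
    omega
  · have hlt : r2 < r1 := by omega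
    have ha := h1.2.2 r2 hlt
    have hb := h2.2.1 r1 h1.1
    omega

-- A's scan (keep the first strictly smaller sum) lands on the first minimum
lemma scanGo (s : List Int) :
    ∀ (t : List Int) (p b : Nat), s.drop p = t → b < s.length → b ≤ p →
      (∀ j, j < p → s.getD b 0 ≤ s.getD j 0) → (∀ j, j < b → s.getD b 0 < s.getD j 0) →
      goodIdx s ((t.foldl (fun (st : Nat × Nat) x =>
        (if x < s.getD st.1 0 then st.2 else st.1, st.2 + 1)) (b, p)).1) := by
  intro t
  induction t with
  | nil =>
    intro p b hdrop hb hbp hmin hfirst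
    have hlen : s.length ≤ p := by
      have := congrArg List.length hdrop
      simp [List.length_drop] at this
      omega
    exact ⟨hb, fun j hj => hmin j (lt_of_lt_of_le hj hlen), hfirst⟩
  | cons x tt ih =>
    intro p b hdrop hb hbp hmin hfirst
    have hlen := congrArg List.length hdrop
    simp [List.length_drop] at hlen
    have hp : p < s.length := by omega
    have hx : s.getD p 0 = x := by
      have h0 : (s.drop p).getD 0 0 = x := by rw [hdrop]; rfl
      rwa [List.getD_eq_getElem?_getD, List.getElem?_drop, Nat.add_zero,
        ← List.getD_eq_getElem?_getD] at h0
    have hdrop' : s.drop (p + 1) = tt := by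
      have h1 : s.drop (p + 1) = (s.drop p).drop 1 := by
        rw [List.drop_drop]
      rw [h1, hdrop]
      rfl
    simp only [List.foldl_cons]
    by_cases hc : x < s.getD b 0
    · rw [if_pos hc]
      exact ih (p + 1) p hdrop' hp (by omega)
        (fun j hj => by
          rcases Nat.lt_or_ge j p with hjp | hjp
          · exact le_of_lt (by rw [hx]; exact lt_of_lt_of_le hc (hmin j hjp))
          · have : j = p := by omega
            subst this; exact le_refl _)
        (fun j hj => by rw [hx]; exact lt_of_lt_of_le hc (hmin j hj))
    · rw [if_neg hc]
      exact ih (p + 1) b hdrop' hb (by omega)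
        (fun j hj => by
          rcases Nat.lt_or_ge j p with hjp | hjp
          · exact hmin j hjp
          · have : j = p := by omega
            subst this; rw [hx]; exact le_of_not_gt hc)
        hfirst

lemma getD_map_sumatoria (conjs : List (PySem.Set (String × Int))) (b : Nat) :
    (conjs.map sumatoria).getD b 0 = sumatoria (conjs.getD b PySem.Set.empty) := by
  by_cases hb : b < conjs.length
  · rw [List.getD_eq_getElem _ _ (by simpa using hb), List.getD_eq_getElem _ _ hb,
      List.getElem_map]
  · rw [List.getD_eq_default _ _ (by simpa using Nat.le_of_not_lt hb),
      List.getD_eq_default _ _ (Nat.le_of_not_lt hb)]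
    rfl

lemma encontrarMinimo_good (conjs : List (PySem.Set (String × Int))) (h : conjs ≠ []) :
    goodIdx (conjs.map sumatoria) (encontrarMinimo conjs) := by
  have hlen : 0 < (conjs.map sumatoria).length := by
    simpa using List.length_pos_iff.mpr h
  have heq : encontrarMinimo conjs =
      ((conjs.map sumatoria).foldl (fun (st : Nat × Nat) x =>
        (if x < (conjs.map sumatoria).getD st.1 0 then st.2 else st.1, st.2 + 1)) (0, 0)).1 := by
    unfold encontrarMinimo
    rw [List.foldl_map]
    have hf : (fun (st : Nat × Nat) (conj : PySem.Set (String × Int)) =>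
          (if sumatoria conj < (conjs.map sumatoria).getD st.1 0 then st.2 else st.1, st.2 + 1))
        = (fun (st : Nat × Nat) conj =>
          (if sumatoria conj < sumatoria (conjs.getD st.1 PySem.Set.empty) then st.2 else st.1,
           st.2 + 1)) := by
      funext st conj
      rw [getD_map_sumatoria]
    rw [hf]
  rw [heq]
  exact scanGo (conjs.map sumatoria) (conjs.map sumatoria) 0 0 List.drop_zero hlen
    (Nat.zero_le _) (fun j hj => absurd hj (Nat.not_lt_zero j))
    (fun j hj => absurd hj (Nat.not_lt_zero j))

lemma bucketIdx_good (s : List Int) (hs : s ≠ []) : goodIdx s (bucketIdx s) := by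
  obtain ⟨m, hm⟩ : ∃ m, PySem.List.min? s (fun x => x) = some m := by
    cases h : PySem.List.min? s (fun x => x) with
    | none => exact absurd ((PySem.List.min?_eq_none_iff s _).1 h) hs
    | some m => exact ⟨m, rfl⟩
  have hmem : m ∈ s := PySem.List.min?_mem hm
  have hminle : ∀ y ∈ s, m ≤ y := PySem.List.min?_isMin hm
  obtain ⟨i, hi⟩ : ∃ i, PySem.List.index? s m = some i := by
    cases h : PySem.List.index? s m with
    | none => exact absurd hmem ((PySem.List.index?_eq_none_iff s m).1 h)
    | some i => exact ⟨i, rfl⟩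
  obtain ⟨hk, hsk, hfirst⟩ := PySem.List.getElem_of_index?_eq_some hi
  have hi' : List.idxOf? m s = some i := by
    rw [← PySem.List.index?_eq_idxOf?]
    exact hi
  have hb : bucketIdx s = i := by simp [bucketIdx, hm, hi']
  have hgd : s.getD i 0 = m := by rw [List.getD_eq_getElem _ _ hk, hsk]
  rw [hb]
  refine ⟨hk, ?_, ?_⟩
  · intro j hj
    rw [hgd, List.getD_eq_getElem _ _ hj]
    exact hminle _ (List.getElem_mem hj)
  · intro j hj
    have hjlen : j < s.length := lt_trans hj hk
    rw [hgd, List.getD_eq_getElem _ _ hjlen]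
    exact lt_of_le_of_ne (hminle _ (List.getElem_mem hjlen)) (fun h => hfirst j hj h.symm)

lemma sumatoria_append_one (b : PySem.Set (String × Int)) (e : String × Int) :
    sumatoria (b ++ [e]) = sumatoria b + e.2 := by
  unfold sumatoria
  rw [List.foldl_append]
  rfl

-- the two folds stay in lockstep: B's second component is always the list of sums of A's sets
lemma mainFold (ms : List (String × Int)) :
    ∀ (conjs : List (PySem.Set (String × Int))), conjs ≠ [] →
      ms.foldl (fun conjs elemento =>
          let i := encontrarMinimo conjs
          conjs.set i (PySem.Set.add (conjs.getD i PySem.Set.empty) elemento)) conjs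
        = (ms.foldl (fun st elemento =>
            let i := bucketIdx st.2
            if elemento ∈ st.1.getD i PySem.Set.empty then st
            else (st.1.set i (PySem.Set.add (st.1.getD i PySem.Set.empty) elemento),
                  st.2.set i (st.2.getD i 0 + elemento.2)))
            (conjs, conjs.map sumatoria)).1 := by
  induction ms with
  | nil => intro conjs h; rfl
  | cons e tl ih =>
    intro conjs h
    have hA := encontrarMinimo_good conjs h
    have hB := bucketIdx_good (conjs.map sumatoria) (by simpa using h)
    have hi : encontrarMinimo conjs = bucketIdx (conjs.map sumatoria) := goodIdx_unique hA hB
    have hilt : bucketIdx (conjs.map sumatoria) < conjs.length := by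
      have := hB.1; simpa using this
    simp only [List.foldl_cons]
    rw [hi]
    set i := bucketIdx (conjs.map sumatoria) with hidef
    have hgetD : conjs.getD i PySem.Set.empty = conjs[i] := List.getD_eq_getElem _ _ hilt
    by_cases hmem : e ∈ conjs.getD i PySem.Set.empty
    · have hset : conjs.set i (PySem.Set.add (conjs.getD i PySem.Set.empty) e) = conjs := by
        rw [PySem.Set.add_of_mem hmem, hgetD, List.set_getElem_self]
      simp only [hmem, if_pos]
      rw [hset]
      exact ih conjs h
    · have hadd : PySem.Set.add (conjs.getD i PySem.Set.empty) e
          = conjs.getD i PySem.Set.empty ++ [e] := PySem.Set.add_of_not_mem hmem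
      have hsums : (conjs.set i (PySem.Set.add (conjs.getD i PySem.Set.empty) e)).map sumatoria
          = (conjs.map sumatoria).set i ((conjs.map sumatoria).getD i 0 + e.2) := by
        rw [List.map_set, hadd, sumatoria_append_one, getD_map_sumatoria]
      simp only [hmem, if_neg, not_false_iff]
      rw [← hsums]
      exact ih _ (by
        intro hnil
        have hlen0 := congrArg List.length hnil
        rw [List.length_set] at hlen0
        simp only [List.length_nil] at hlen0
        omega)

-- the initial states coincide: k empty sets, and their sums are k zeros
lemma initA_eq (k : Int) :
    (PySem.List.pyRange 0 k 1).foldl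
        (fun acc _ => acc ++ [(PySem.Set.empty : PySem.Set (String × Int))]) []
      = (PySem.List.pyRange 0 k 1).map (fun _ => PySem.Set.empty) := by
  rw [PySem.List.foldl_append_singleton_eq_map]
  rfl

lemma initSums_eq (k : Int) :
    ((PySem.List.pyRange 0 k 1).map
        (fun _ => (PySem.Set.empty : PySem.Set (String × Int)))).map sumatoria
      = List.replicate k.toNat 0 := by
  rw [List.map_map]
  have h1 : ((PySem.List.pyRange 0 k 1).map (sumatoria ∘ fun _ => PySem.Set.empty))
      = List.replicate (PySem.List.pyRange 0 k 1).length (0 : Int) := by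
    rw [List.eq_replicate_iff]
    refine ⟨by simp, ?_⟩
    intro b hb
    simp only [List.mem_map] at hb
    obtain ⟨x, _, hx⟩ := hb
    exact hx.symm
  rw [h1, PySem.List.length_pyRange_one]
  norm_num

-- ===== VERDICT (by name: the statement is the Claim_ definition above) =====
theorem greedy1_spec : Claim_equal_greedy1 := by
  intro maestros k _ hpre
  unfold Spec_greedy1 greedy1 greedy1_alt
  simp only []
  rw [initA_eq]
  rcases hpre with hk | hms
  · have hne : (PySem.List.pyRange 0 k 1).map
        (fun _ => (PySem.Set.empty : PySem.Set (String × Int))) ≠ [] := by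
      intro hnil
      have := congrArg List.length hnil
      simp [PySem.List.length_pyRange_one] at this
      omega
    rw [mainFold _ _ hne, initSums_eq]
  · subst hms
    rw [(PySem.List.sorted_eq_nil_iff [] _ _).2 rfl]
    rfl
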